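-- pv_equiv track=rewrite | github.com/nicklasorte/spectrum-systems | scripts/build_small_batch_risk_record.py | classify_surface
-- ===== SOURCE A (Python) =====
-- _DASHBOARD_PATH_PREFIXES: tuple[str, ...] = (
--     "apps/dashboard-3ls/",
--     "artifacts/dashboard_metrics/",
--     "artifacts/dashboard_cases/",
--     "dashboard/",
-- )
--
-- _GENERATED_PATH_PREFIXES: tuple[str, ...] = (
--     "artifacts/tls/",
--     "artifacts/dashboard_",
--     "artifacts/system_dependency_priority_report.json",
--     "governance/reports/",
--     "ecosystem/",
--     "artifacts/",
-- )
--
-- def classify_surface(path: str) -> str: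
--     """Classify a single changed path into a surface class.
--
--     Returns one of the surface class names from ``SURFACE_CLASSES`` or
--     ``"other"`` for paths that do not match any specific surface.
--     """
--     if not path or not isinstance(path, str):
--         return "other"
--
--     # Dashboard takes priority over generated artifacts because
--     # ``artifacts/dashboard_*`` would otherwise be classified as a
--     # generated artifact.
--     for prefix in _DASHBOARD_PATH_PREFIXES:
--         if path.startswith(prefix):
--             return "dashboard"
--     if path == "apps/dashboard-3ls/app/page.tsx":
--         return "dashboard"
--
--     if path == "contracts/standards-manifest.json":
--         return "standards_manifest"
--     if path.startswith("contracts/schemas/"):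
--         return "contracts_schemas"
--     if path.startswith("contracts/examples/"):
--         return "contracts_examples"
--
--     if path.startswith("spectrum_systems/"):
--         return "runtime"
--
--     if path.startswith("scripts/"):
--         return "scripts"
--
--     if path.startswith("tests/"):
--         return "tests"
--
--     if path.startswith("docs/reviews/"):
--         return "docs_reviews"
--     if path.startswith("docs/review-actions/"):
--         return "docs_review_actions"
--     if path.startswith("docs/governance/"):
--         return "docs_governance"
--
--     if path.startswith(".github/workflows/"):
--         return "github_workflows"
--
--     for prefix in _GENERATED_PATH_PREFIXES:
--         if path.startswith(prefix):
--             return "generated_artifacts"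
--
--     return "other"
-- ===== SOURCE B (Python) =====
-- def classify_surface(path: str) -> str:
--     if not path or not isinstance(path, str):
--         return "other"
--     # Split once at the first "/" and dispatch on the top-level segment;
--     # each rule prefix in A begins with "<segment>/", so a single partition
--     # replaces all the repeated whole-string startswith scans.
--     head, sep, rest = path.partition("/")
--     if not sep:
--         return "other"
--     if head == "apps":
--         return "dashboard" if rest.startswith("dashboard-3ls/") else "other"
--     if head == "dashboard":
--         return "dashboard"
--     if head == "artifacts":
--         if rest.startswith("dashboard_metrics/") or rest.startswith("dashboard_cases/"):
--             return "dashboard"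
--         return "generated_artifacts"
--     if head == "contracts":
--         if rest == "standards-manifest.json":
--             return "standards_manifest"
--         if rest.startswith("schemas/"):
--             return "contracts_schemas"
--         if rest.startswith("examples/"):
--             return "contracts_examples"
--         return "other"
--     if head == "spectrum_systems":
--         return "runtime"
--     if head == "scripts":
--         return "scripts"
--     if head == "tests":
--         return "tests"
--     if head == "docs":
--         if rest.startswith("reviews/"):
--             return "docs_reviews"
--         if rest.startswith("review-actions/"):
--             return "docs_review_actions"
--         if rest.startswith("governance/"):
--             return "docs_governance"
--         return "other"
--     if head == ".github":
--         return "github_workflows" if rest.startswith("workflows/") else "other"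
--     if head == "governance":
--         return "generated_artifacts" if rest.startswith("reports/") else "other"
--     if head == "ecosystem":
--         return "generated_artifacts"
--     return "other"
-- ===== Notes on version B (the rewrite author's own statement) =====
-- stated objective: alternative
-- what changed: B partitions the path once at its first '/' and dispatches on the top-level segment with per-segment sub-checks on the remainder, instead of A's cascade of whole-string startswith tests against full prefix literals.
import Mathlib
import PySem

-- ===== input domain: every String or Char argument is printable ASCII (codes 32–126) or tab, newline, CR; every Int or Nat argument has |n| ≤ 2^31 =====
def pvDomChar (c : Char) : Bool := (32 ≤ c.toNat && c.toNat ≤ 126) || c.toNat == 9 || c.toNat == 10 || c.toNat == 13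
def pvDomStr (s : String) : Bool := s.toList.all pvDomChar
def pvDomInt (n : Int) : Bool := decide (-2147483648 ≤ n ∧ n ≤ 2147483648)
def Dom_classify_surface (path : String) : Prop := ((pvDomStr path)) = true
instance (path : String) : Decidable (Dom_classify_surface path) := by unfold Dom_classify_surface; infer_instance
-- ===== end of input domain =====

-- B splits the path once at its first "/" and dispatches on the top-level segment
-- instead of A's repeated whole-string startswith cascade (idiomatic, same cost).

-- ===== PORT A =====
def pvDashboardPrefixes : List String :=
  ["apps/dashboard-3ls/", "artifacts/dashboard_metrics/", "artifacts/dashboard_cases/", "dashboard/"]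

def pvGeneratedPrefixes : List String :=
  ["artifacts/tls/", "artifacts/dashboard_", "artifacts/system_dependency_priority_report.json",
   "governance/reports/", "ecosystem/", "artifacts/"]

def classify_surface (path : String) : String :=
  if path = "" then "other"
  else if pvDashboardPrefixes.any (fun p => PySem.Str.startswith path p) then "dashboard"
  else if path = "apps/dashboard-3ls/app/page.tsx" then "dashboard"
  else if path = "contracts/standards-manifest.json" then "standards_manifest"
  else if PySem.Str.startswith path "contracts/schemas/" then "contracts_schemas"
  else if PySem.Str.startswith path "contracts/examples/" then "contracts_examples"
  else if PySem.Str.startswith path "spectrum_systems/" then "runtime"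
  else if PySem.Str.startswith path "scripts/" then "scripts"
  else if PySem.Str.startswith path "tests/" then "tests"
  else if PySem.Str.startswith path "docs/reviews/" then "docs_reviews"
  else if PySem.Str.startswith path "docs/review-actions/" then "docs_review_actions"
  else if PySem.Str.startswith path "docs/governance/" then "docs_governance"
  else if PySem.Str.startswith path ".github/workflows/" then "github_workflows"
  else if pvGeneratedPrefixes.any (fun p => PySem.Str.startswith path p) then "generated_artifacts"
  else "other"

-- ===== PORT B =====
-- path.partition("/") ported on the character-list side (exact: first "/" splits the
-- string into head, separator, rest; pvRest = none means no "/" occurs).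
def pvHead (cs : List Char) : List Char := cs.takeWhile (fun c => c ≠ '/')

def pvRest (cs : List Char) : Option (List Char) :=
  match cs.dropWhile (fun c => c ≠ '/') with
  | [] => none
  | _ :: t => some t

def classify_surface_alt (path : String) : String :=
  if path = "" then "other"
  else
    match pvRest path.toList with
    | none => "other"
    | some rest =>
      let head := pvHead path.toList
      if head = "apps".toList then
        (if PySem.Chars.startswith rest "dashboard-3ls/".toList then "dashboard" else "other")
      else if head = "dashboard".toList then "dashboard"
      else if head = "artifacts".toList then
        (if PySem.Chars.startswith rest "dashboard_metrics/".toList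
            || PySem.Chars.startswith rest "dashboard_cases/".toList then "dashboard"
         else "generated_artifacts")
      else if head = "contracts".toList then
        (if rest = "standards-manifest.json".toList then "standards_manifest"
         else if PySem.Chars.startswith rest "schemas/".toList then "contracts_schemas"
         else if PySem.Chars.startswith rest "examples/".toList then "contracts_examples"
         else "other")
      else if head = "spectrum_systems".toList then "runtime"
      else if head = "scripts".toList then "scripts"
      else if head = "tests".toList then "tests"
      else if head = "docs".toList then
        (if PySem.Chars.startswith rest "reviews/".toList then "docs_reviews"
         else if PySem.Chars.startswith rest "review-actions/".toList then "docs_review_actions"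
         else if PySem.Chars.startswith rest "governance/".toList then "docs_governance"
         else "other")
      else if head = ".github".toList then
        (if PySem.Chars.startswith rest "workflows/".toList then "github_workflows" else "other")
      else if head = "governance".toList then
        (if PySem.Chars.startswith rest "reports/".toList then "generated_artifacts" else "other")
      else if head = "ecosystem".toList then "generated_artifacts"
      else "other"

-- ===== PRECONDITION & SPEC =====
def Spec_classify_surface (path : String) (out : String) : Prop := out = classify_surface_alt path
instance (path : String) (out : String) : Decidable (Spec_classify_surface path out) := by unfold Spec_classify_surface; infer_instance

-- ===== CLAIM =====
def Claim_equal_classify_surface : Prop := ∀ (path : String), Dom_classify_surface path → Spec_classify_surface path (classify_surface path)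

-- ===== LEMMAS AND PROOFS =====
lemma pv_head_cons (c : Char) (cs : List Char) (hc : c ≠ '/') :
    pvHead (c :: cs) = c :: pvHead cs := by simp [pvHead, hc]

lemma pv_rest_cons (c : Char) (cs : List Char) (hc : c ≠ '/') :
    pvRest (c :: cs) = pvRest cs := by simp [pvRest, hc]

lemma pv_prefix_split (h : List Char) (hh : '/' ∉ h) (p cs : List Char) :
    (h ++ '/' :: p) <+: cs ↔ pvHead cs = h ∧ ∃ t, pvRest cs = some t ∧ p <+: t := by
  induction h generalizing cs with
  | nil =>
    cases cs with
    | nil => simp [pvHead, pvRest]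
    | cons c cs' =>
      by_cases hc : c = '/'
      · subst hc
        simp [pvHead, pvRest, List.cons_prefix_iff]
      · rw [pv_head_cons c cs' hc, pv_rest_cons c cs' hc]
        simp [List.cons_prefix_iff]
        exact fun e _ => hc e
  | cons a h ih =>
    have ha : a ≠ '/' := by intro e; exact hh (e ▸ List.mem_cons_self)
    have hh' : '/' ∉ h := fun m => hh (List.mem_cons_of_mem _ m)
    cases cs with
    | nil => simp [pvHead, pvRest]
    | cons c cs' =>
      by_cases hc : c = '/'
      · subst hc
        rw [List.cons_append, List.cons_prefix_iff]
        simp [pvHead, Ne.symm ha]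
      · rw [List.cons_append, List.cons_prefix_iff, pv_head_cons c cs' hc,
            pv_rest_cons c cs' hc]
        constructor
        · rintro ⟨l', hl, hp⟩
          injection hl with e1 e2
          subst e1; subst e2
          rcases (ih hh' cs').1 hp with ⟨h1, t, h2, h3⟩
          exact ⟨by rw [h1], t, h2, h3⟩
        · rintro ⟨hhead, t, h2, h3⟩
          injection hhead with e1 e2
          subst e1
          exact ⟨cs', rfl, (ih hh' cs').2 ⟨e2, t, h2, h3⟩⟩

lemma pv_sw (h p : List Char) (hh : '/' ∉ h) (cs : List Char) :
    PySem.Chars.startswith cs (h ++ '/' :: p) =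
      (decide (pvHead cs = h) &&
        (pvRest cs).elim false (fun t => PySem.Chars.startswith t p)) := by
  rcases hr : pvRest cs with _ | t
  · simp only [Option.elim_none, Bool.and_false, Bool.eq_false_iff]
    intro hsw
    rcases (pv_prefix_split h hh p cs).1 ((PySem.Chars.startswith_iff _ _).1 hsw) with ⟨_, t, h2, _⟩
    rw [hr] at h2
    simp at h2
  · simp only [Option.elim_some]
    rw [Bool.eq_iff_iff]
    simp only [Bool.and_eq_true, decide_eq_true_eq, PySem.Chars.startswith_iff]
    rw [pv_prefix_split h hh p cs]
    constructor
    · rintro ⟨h1, t', h2, h3⟩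
      rw [hr] at h2
      injection h2 with e
      subst e
      exact ⟨h1, h3⟩
    · rintro ⟨h1, h3⟩
      exact ⟨h1, t, hr, h3⟩

lemma pv_eq_split (h : List Char) (hh : '/' ∉ h) (p cs : List Char) :
    cs = h ++ '/' :: p ↔ pvHead cs = h ∧ pvRest cs = some p := by
  induction h generalizing cs with
  | nil =>
    cases cs with
    | nil => simp [pvHead, pvRest]
    | cons c cs' =>
      by_cases hc : c = '/'
      · subst hc
        simp [pvHead, pvRest]
      · rw [pv_head_cons c cs' hc, pv_rest_cons c cs' hc]
        simp [hc]
  | cons a h ih =>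
    have ha : a ≠ '/' := by intro e; exact hh (e ▸ List.mem_cons_self)
    have hh' : '/' ∉ h := fun m => hh (List.mem_cons_of_mem _ m)
    cases cs with
    | nil => simp [pvHead, pvRest]
    | cons c cs' =>
      by_cases hc : c = '/'
      · subst hc
        simp [pvHead, Ne.symm ha]
      · rw [List.cons_append, pv_head_cons c cs' hc, pv_rest_cons c cs' hc]
        simp only [List.cons.injEq]
        rw [ih hh' cs']
        tauto

-- ===== VERDICT =====
theorem classify_surface_spec : Claim_equal_classify_surface := by
  intro path _
  unfold Spec_classify_surface
  by_cases h0 : path = ""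
  · subst h0; rfl
  by_cases e5 : path = "apps/dashboard-3ls/app/page.tsx"
  · subst e5; rfl
  by_cases e6 : path = "contracts/standards-manifest.json"
  · subst e6; rfl
  have sw_nil : ∀ t : List Char, PySem.Chars.startswith t ("".toList) = true :=
    fun t => (PySem.Chars.startswith_iff _ _).2 (List.nil_prefix)
  have d1 : ("apps/dashboard-3ls/" : String).toList = "apps".toList ++ '/' :: "dashboard-3ls/".toList := by decide
  have d2 : ("artifacts/dashboard_metrics/" : String).toList = "artifacts".toList ++ '/' :: "dashboard_metrics/".toList := by decide
  have d3 : ("artifacts/dashboard_cases/" : String).toList = "artifacts".toList ++ '/' :: "dashboard_cases/".toList := by decide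
  have d4 : ("dashboard/" : String).toList = "dashboard".toList ++ '/' :: "".toList := by decide
  have d5 : ("contracts/schemas/" : String).toList = "contracts".toList ++ '/' :: "schemas/".toList := by decide
  have d6 : ("contracts/examples/" : String).toList = "contracts".toList ++ '/' :: "examples/".toList := by decide
  have d7 : ("spectrum_systems/" : String).toList = "spectrum_systems".toList ++ '/' :: "".toList := by decide
  have d8 : ("scripts/" : String).toList = "scripts".toList ++ '/' :: "".toList := by decide
  have d9 : ("tests/" : String).toList = "tests".toList ++ '/' :: "".toList := by decide
  have d10 : ("docs/reviews/" : String).toList = "docs".toList ++ '/' :: "reviews/".toList := by decide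
  have d11 : ("docs/review-actions/" : String).toList = "docs".toList ++ '/' :: "review-actions/".toList := by decide
  have d12 : ("docs/governance/" : String).toList = "docs".toList ++ '/' :: "governance/".toList := by decide
  have d13 : (".github/workflows/" : String).toList = ".github".toList ++ '/' :: "workflows/".toList := by decide
  have d14 : ("artifacts/tls/" : String).toList = "artifacts".toList ++ '/' :: "tls/".toList := by decide
  have d15 : ("artifacts/dashboard_" : String).toList = "artifacts".toList ++ '/' :: "dashboard_".toList := by decide
  have d16 : ("artifacts/system_dependency_priority_report.json" : String).toList = "artifacts".toList ++ '/' :: "system_dependency_priority_report.json".toList := by decide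
  have d17 : ("governance/reports/" : String).toList = "governance".toList ++ '/' :: "reports/".toList := by decide
  have d19 : ("artifacts/" : String).toList = "artifacts".toList ++ '/' :: "".toList := by decide
  have d18 : ("ecosystem/" : String).toList = "ecosystem".toList ++ '/' :: "".toList := by decide
  unfold classify_surface classify_surface_alt pvDashboardPrefixes pvGeneratedPrefixes
  simp only [List.any_cons, List.any_nil, PySem.Str.startswith_eq,
             d1, d2, d3, d4, d5, d6, d7, d8, d9, d10, d11, d12, d13, d14, d15, d16, d17, d18, d19,
             pv_sw _ _ (by decide : '/' ∉ "apps".toList),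
             pv_sw _ _ (by decide : '/' ∉ "artifacts".toList),
             pv_sw _ _ (by decide : '/' ∉ "dashboard".toList),
             pv_sw _ _ (by decide : '/' ∉ "contracts".toList),
             pv_sw _ _ (by decide : '/' ∉ "spectrum_systems".toList),
             pv_sw _ _ (by decide : '/' ∉ "scripts".toList),
             pv_sw _ _ (by decide : '/' ∉ "tests".toList),
             pv_sw _ _ (by decide : '/' ∉ "docs".toList),
             pv_sw _ _ (by decide : '/' ∉ ".github".toList),
             pv_sw _ _ (by decide : '/' ∉ "governance".toList),
             pv_sw _ _ (by decide : '/' ∉ "ecosystem".toList),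
             sw_nil, h0, e5, e6, if_false]
  clear d1 d2 d3 d4 d5 d6 d7 d8 d9 d10 d11 d12 d13 d14 d15 d16 d17 d18 d19
  rcases hr : pvRest path.toList with _ | rest
  · simp
  simp only [Option.elim_some]
  by_cases c1 : pvHead path.toList = "apps".toList
  · by_cases s1 : PySem.Chars.startswith rest "dashboard-3ls/".toList = true
    · simp_all
    · simp_all
  by_cases c2 : pvHead path.toList = "artifacts".toList
  · by_cases s2 : PySem.Chars.startswith rest "dashboard_metrics/".toList = true
    · simp_all
    by_cases s3 : PySem.Chars.startswith rest "dashboard_cases/".toList = true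
    · simp_all
    · simp_all
  by_cases c3 : pvHead path.toList = "dashboard".toList
  · simp_all
  by_cases c4 : pvHead path.toList = "contracts".toList
  · have hsm : ¬ rest = "standards-manifest.json".toList := by
      intro hreq
      apply e6
      apply String.ext
      rw [(pv_eq_split "contracts".toList (by decide) "standards-manifest.json".toList path.toList).2 ⟨c4, by rw [hr, hreq]⟩]
      decide
    by_cases s4 : PySem.Chars.startswith rest "schemas/".toList = true
    · simp_all
    by_cases s5 : PySem.Chars.startswith rest "examples/".toList = true
    · simp_all
    · simp_all
  by_cases c5 : pvHead path.toList = "spectrum_systems".toList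
  · simp_all
  by_cases c6 : pvHead path.toList = "scripts".toList
  · simp_all
  by_cases c7 : pvHead path.toList = "tests".toList
  · simp_all
  by_cases c8 : pvHead path.toList = "docs".toList
  · by_cases s6 : PySem.Chars.startswith rest "reviews/".toList = true
    · simp_all
    by_cases s7 : PySem.Chars.startswith rest "review-actions/".toList = true
    · simp_all
    by_cases s8 : PySem.Chars.startswith rest "governance/".toList = true
    · simp_all
    · simp_all
  by_cases c9 : pvHead path.toList = ".github".toList
  · by_cases s9 : PySem.Chars.startswith rest "workflows/".toList = true
    · simp_all
    · simp_all
  by_cases c10 : pvHead path.toList = "governance".toList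
  · by_cases s10 : PySem.Chars.startswith rest "reports/".toList = true
    · simp_all
    · simp_all
  by_cases c11 : pvHead path.toList = "ecosystem".toList
  · simp_all
  simp_all
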